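-- pv_equiv track=rewrite | github.com/jsg71/time-series-clean | scripts/run_ncd.py | runs
-- ===== SOURCE A (Python) =====
-- def runs(b):
--     out = []
--     on = False
--     for i, v in enumerate(b):
--         if v and not on:
--             on, st = True, i
--         if not v and on:
--             on = False
--             out.append((st, i - 1))
--     if on:
--         out.append((st, len(b) - 1))
--     return out
-- ===== SOURCE B (Python) =====
-- def runs(b):
--     n = len(b)
--     starts = [i for i in range(n) if b[i] and (i == 0 or not b[i-1])]
--     ends = [i for i in range(n) if b[i] and (i == n-1 or not b[i+1])]
--     return list(zip(starts, ends))
-- ===== Notes on version B (the rewrite author's own statement) =====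
-- stated objective: alternative
-- what changed: Replaces A's single-pass on/off state machine with staged boundary detection: one index pass collecting run starts (truthy with falsy-or-absent left neighbour), one collecting run ends (truthy with falsy-or-absent right neighbour), zipped into intervals.
import Mathlib
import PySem

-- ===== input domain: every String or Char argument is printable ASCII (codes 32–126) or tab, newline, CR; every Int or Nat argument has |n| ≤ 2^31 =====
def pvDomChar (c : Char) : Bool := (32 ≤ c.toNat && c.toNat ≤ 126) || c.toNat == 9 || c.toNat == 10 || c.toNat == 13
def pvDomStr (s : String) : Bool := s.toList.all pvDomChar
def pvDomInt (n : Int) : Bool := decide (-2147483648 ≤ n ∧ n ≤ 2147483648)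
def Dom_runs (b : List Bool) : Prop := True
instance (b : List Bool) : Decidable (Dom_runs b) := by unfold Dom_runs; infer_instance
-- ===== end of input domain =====

-- B replaces A's single-pass on/off state machine by two staged index passes
-- (run starts = truthy with falsy/absent left neighbour, run ends = truthy with
-- falsy/absent right neighbour) zipped into intervals; same O(n) cost.

-- ===== PORT A =====
def runsStep (acc : List (Int × Int) × Bool × Int) (iv : Int × Bool) :
    List (Int × Int) × Bool × Int :=
  let out := acc.1
  let i := iv.1
  let v := iv.2
  -- if v and not on: on, st = True, i
  let p := if v && !acc.2.1 then (true, i) else (acc.2.1, acc.2.2)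
  -- if not v and on: on = False; out.append((st, i - 1))
  if !v && p.1 then (out ++ [(p.2, i - 1)], false, p.2) else (out, p.1, p.2)

def runs (b : List Bool) : List (Int × Int) :=
  let s := (PySem.List.enumerate b 0).foldl runsStep ([], false, 0)
  if s.2.1 then s.1 ++ [(s.2.2, (b.length : Int) - 1)] else s.1

-- ===== PORT B =====
-- b[i] for an in-range index (the default never fires on the guarded accesses)
def bget (b : List Bool) (i : Int) : Bool := PySem.List.pyGetD b i false

def runs_alt (b : List Bool) : List (Int × Int) :=
  let n : Int := b.length
  let starts := (PySem.List.pyRange 0 n 1).filter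
    (fun i => bget b i && (i == 0 || !(bget b (i - 1))))
  let ends := (PySem.List.pyRange 0 n 1).filter
    (fun i => bget b i && (i == n - 1 || !(bget b (i + 1))))
  starts.zip ends

-- ===== PRECONDITION & SPEC =====
def Spec_runs (b : List Bool) (out : List (Int × Int)) : Prop := out = runs_alt b
instance (b : List Bool) (out : List (Int × Int)) : Decidable (Spec_runs b out) := by unfold Spec_runs; infer_instance

-- ===== CLAIM (what is proved, stated in full; the proofs are below) =====
def Claim_equal_runs : Prop := ∀ (b : List Bool), Dom_runs b → Spec_runs b (runs b)

-- ===== LEMMAS AND PROOFS =====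

theorem if_cons_split (c : Prop) [Decidable c] (x : Int) (L : List Int) :
    (if c then x :: L else L) = (if c then [x] else []) ++ L := by
  split <;> simp

-- A's loop, written recursively with the running index i.
def runsArec (b : List Bool) (i : Int) (on : Bool) (st : Int) : List (Int × Int) :=
  match b with
  | [] => if on then [(st, i - 1)] else []
  | v :: t =>
    let p := if v && !on then (true, i) else (on, st)
    if !v && p.1 then (p.2, i - 1) :: runsArec t (i + 1) false p.2
    else runsArec t (i + 1) p.1 p.2

def finishA (s : List (Int × Int) × Bool × Int) (N : Int) : List (Int × Int) :=
  if s.2.1 then s.1 ++ [(s.2.2, N - 1)] else s.1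

theorem runs_fold_eq (b : List Bool) : ∀ (i : Int) (out : List (Int × Int)) (on : Bool) (st : Int),
    finishA ((PySem.List.enumerate b i).foldl runsStep (out, on, st)) (i + (b.length : Int))
      = out ++ runsArec b i on st := by
  induction b with
  | nil =>
    intro i out on st
    cases on <;> simp [finishA, runsArec, PySem.List.enumerate_nil]
  | cons v t ih =>
    intro i out on st
    rw [PySem.List.enumerate_cons, List.foldl_cons]
    have hc : i + ((t.length + 1 : Nat) : Int) = (i + 1) + (t.length : Int) := by
      push_cast; ring
    simp only [List.length_cons, hc]
    cases v <;> cases on <;>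
      simp only [runsStep, runsArec, Bool.and_self, Bool.not_true, Bool.not_false,
        Bool.and_true, Bool.and_false, if_true, if_false, Bool.false_eq_true]
    · exact ih (i + 1) out false st
    · rw [ih (i + 1) (out ++ [(st, i - 1)]) false st]
      simp
    · exact ih (i + 1) out true i
    · exact ih (i + 1) out true st

-- B's two passes, written recursively with the running index j.
def recS (b : List Bool) (prev : Bool) (j : Int) : List Int :=
  match b with
  | [] => []
  | v :: t => (if v && !prev then [j] else []) ++ recS t v (j + 1)

def recE (b : List Bool) (j : Int) : List Int :=
  match b with
  | [] => []
  | v :: t => (if v && !(t.headD false) then [j] else []) ++ recE t (j + 1)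

-- zipping the recursive start/end lists is A's state machine
theorem zip_recSE (b : List Bool) : ∀ (i st : Int),
    (recS b false i).zip (recE b i) = runsArec b i false st
    ∧ (st :: recS b true i).zip
        ((if !(b.headD false) then [i - 1] else []) ++ recE b i) = runsArec b i true st := by
  induction b with
  | nil =>
    intro i st
    constructor
    · simp [recS, recE, runsArec]
    · simp [recS, recE, runsArec, List.headD]
  | cons v t ih =>
    intro i st
    cases v
    · refine ⟨?_, ?_⟩
      · -- on=false, head false: nothing happens on either side
        show (recS t false (i + 1)).zip (recE t (i + 1)) = _
        rw [(ih (i + 1) st).1]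
        simp [runsArec]
      · -- on=true, head false: A closes the run at i-1; B's pending start meets end i-1
        show (st :: recS t false (i + 1)).zip ((i - 1) :: recE t (i + 1)) = _
        rw [List.zip_cons_cons, (ih (i + 1) st).1]
        simp [runsArec]
    · refine ⟨?_, ?_⟩
      · -- on=false, head true: A opens a run at i; B emits start i
        show (i :: recS t true (i + 1)).zip
            ((if !(t.headD false) then [i] else []) ++ recE t (i + 1)) = _
        have h := (ih (i + 1) i).2
        rw [show (i + 1) - 1 = i from by ring] at h
        rw [h]
        simp [runsArec]
      · -- on=true, head true: the run continues
        show (st :: recS t true (i + 1)).zip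
            ((if !(t.headD false) then [i] else []) ++ recE t (i + 1)) = _
        have h := (ih (i + 1) st).2
        rw [show (i + 1) - 1 = i from by ring] at h
        rw [h]
        simp [runsArec]

-- the filtered index pass for starts is recS, on any suffix
theorem filt_starts (b : List Bool) : ∀ (t : List Bool) (j : Int), 0 ≤ j →
    (∀ k : Nat, k < t.length → bget b (j + (k : Int)) = t.getD k false) →
    (PySem.List.pyRange j (j + (t.length : Int)) 1).filter
        (fun i => bget b i && (i == 0 || !(bget b (i - 1))))
      = recS t (if j = 0 then false else bget b (j - 1)) j := by
  intro t
  induction t with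
  | nil =>
    intro j _ _
    simp [recS]
  | cons v u ih =>
    intro j hj hk
    have hlt : j < j + ((u.length + 1 : Nat) : Int) := by push_cast; omega
    rw [List.length_cons, PySem.List.pyRange_one_cons hlt, List.filter_cons]
    have hv : bget b j = v := by
      have := hk 0 (by simp)
      simpa using this
    have hrest : j + ((u.length + 1 : Nat) : Int) = (j + 1) + (u.length : Int) := by
      push_cast; ring
    rw [hrest, ih (j + 1) (by omega) (fun k hku => by
      have := hk (k + 1) (by simpa using Nat.succ_lt_succ hku)
      rw [show j + ((k + 1 : Nat) : Int) = (j + 1) + (k : Int) from by push_cast; ring] at this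
      simpa using this)]
    have hprev : ((j : Int) == 0 || !(bget b (j - 1))) = !(if j = 0 then false else bget b (j - 1)) := by
      by_cases h0 : j = 0 <;> simp [h0]
    have hnz : ¬ (j + 1 = 0) := by omega
    have hpv : bget b (j + 1 - 1) = v := by rw [show j + 1 - 1 = j from by ring, hv]
    rw [recS]
    simp only [hv, hprev, hnz, if_false, hpv]
    exact if_cons_split _ _ _

-- the filtered index pass for ends is recE, on any suffix filling the list to its end
theorem filt_ends (b : List Bool) : ∀ (t : List Bool) (j : Int), 0 ≤ j →
    (∀ k : Nat, k < t.length → bget b (j + (k : Int)) = t.getD k false) →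
    j + (t.length : Int) = (b.length : Int) →
    (PySem.List.pyRange j (j + (t.length : Int)) 1).filter
        (fun i => bget b i && (i == (b.length : Int) - 1 || !(bget b (i + 1))))
      = recE t j := by
  intro t
  induction t with
  | nil =>
    intro j _ _ _
    simp [recE]
  | cons v u ih =>
    intro j hj hk hn
    have hlt : j < j + ((u.length + 1 : Nat) : Int) := by push_cast; omega
    rw [List.length_cons, PySem.List.pyRange_one_cons hlt, List.filter_cons]
    have hv : bget b j = v := by
      have := hk 0 (by simp)
      simpa using this
    have hrest : j + ((u.length + 1 : Nat) : Int) = (j + 1) + (u.length : Int) := by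
      push_cast; ring
    have hn' : (j + 1) + (u.length : Int) = (b.length : Int) := by
      rw [← hn, List.length_cons]; push_cast; ring
    rw [hrest, ih (j + 1) (by omega) (fun k hku => by
      have := hk (k + 1) (by simpa using Nat.succ_lt_succ hku)
      rw [show j + ((k + 1 : Nat) : Int) = (j + 1) + (k : Int) from by push_cast; ring] at this
      simpa using this) hn']
    have hcond : ((j : Int) == (b.length : Int) - 1 || !(bget b (j + 1))) = !(u.headD false) := by
      cases u with
      | nil =>
        have h1 : j + 1 = (b.length : Int) := by simpa using hn
        have h2 : j = (b.length : Int) - 1 := by omega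
        simp [List.headD, h2]
      | cons w r =>
        have hne : ¬ (j = (b.length : Int) - 1) := by
          rw [← hn']; simp; omega
        have hw : bget b (j + 1) = w := by
          have := hk 1 (by simp)
          simpa using this
        simp [hne, hw, List.headD]
    rw [recE]
    simp only [hv, hcond]
    exact if_cons_split _ _ _

-- ===== VERDICT (by name: the statement is the Claim_ definition above) =====
theorem runs_spec : Claim_equal_runs := by
  intro b _
  unfold Spec_runs runs runs_alt
  have hA := runs_fold_eq b 0 [] false 0
  simp only [zero_add] at hA
  unfold finishA at hA
  rw [hA, List.nil_append]
  show runsArec b 0 false 0 =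
    ((PySem.List.pyRange 0 (b.length : Int) 1).filter
        (fun i => bget b i && (i == 0 || !(bget b (i - 1))))).zip
      ((PySem.List.pyRange 0 (b.length : Int) 1).filter
        (fun i => bget b i && (i == (b.length : Int) - 1 || !(bget b (i + 1)))))
  have hget : ∀ k : Nat, k < b.length → bget b ((0 : Int) + (k : Int)) = b.getD k false := by
    intro k hk
    simp [bget, PySem.List.pyGetD_natCast]
  have hS := filt_starts b b 0 (by omega) hget
  have hE := filt_ends b b 0 (by omega) hget (by ring)
  rw [if_pos rfl] at hS
  simp only [zero_add] at hS hE
  rw [hS, hE]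
  exact ((zip_recSE b 0 0).1).symm
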